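-- pv_equiv track=rewrite | github.com/daniel-bell/sacdebug | saclib.py | sacvar_to_c
-- ===== SOURCE A (Python) =====
-- def sacvar_to_c(var_name, local_vars):
--     """Converts a SaC variable name to the newest C version"""
--     valid_vars = list()
--
--     for i, var in enumerate(local_vars):
--         if var[:5] == "SACp_":
--             underscore_limit = 3
--         else:
--             underscore_limit = 1
--
--         # Skip the first 2 underscores to get the proper variable name
--         signature = ""
--         underscores = 0
--         for ch in var:
--             if underscores < underscore_limit:
--                 if ch == "_":
--                     underscores += 1
--             else:
--                 signature += ch
--         valid_vars.append((signature, var))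
--
--     # Generate a list of variables that match the var_name
--     matched_vars = list()
--     sig_size = len(var_name)
--     for var in valid_vars:
--         match_string = var[0][:sig_size]
--         if match_string == var_name:
--             matched_vars.append(var[1])
--
--     # If there's more than one variable Single Static Assignment has occurred
--     # Sort the list to make sure the highest index contains the latest SSA var
--
--     if matched_vars:
--         if len(matched_vars) == 1:
--             return matched_vars[0]
--         else:
--             return sorted(matched_vars)[len(matched_vars) - 1]
--     else:
--         return None
-- ===== SOURCE B (Python) =====
-- def sacvar_to_c(var_name, local_vars):
--     """Converts a SaC variable name to the newest C version"""
--     best = None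
--     for var in local_vars:
--         limit = 3 if var.startswith("SACp_") else 1
--         parts = var.split("_", limit)
--         signature = parts[limit] if len(parts) > limit else ""
--         if signature.startswith(var_name):
--             if best is None or var > best:
--                 best = var
--     return best
-- ===== Notes on version B (the rewrite author's own statement) =====
-- stated objective: simpler
-- what changed: Replaces A's three-stage pipeline (build a (signature, var) list with a character-counting loop, filter it into matched_vars, then sort and take the last element) by a single pass over local_vars that derives each signature with split('_', limit), tests it with startswith, and keeps a running lexicographic maximum.
import Mathlib
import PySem

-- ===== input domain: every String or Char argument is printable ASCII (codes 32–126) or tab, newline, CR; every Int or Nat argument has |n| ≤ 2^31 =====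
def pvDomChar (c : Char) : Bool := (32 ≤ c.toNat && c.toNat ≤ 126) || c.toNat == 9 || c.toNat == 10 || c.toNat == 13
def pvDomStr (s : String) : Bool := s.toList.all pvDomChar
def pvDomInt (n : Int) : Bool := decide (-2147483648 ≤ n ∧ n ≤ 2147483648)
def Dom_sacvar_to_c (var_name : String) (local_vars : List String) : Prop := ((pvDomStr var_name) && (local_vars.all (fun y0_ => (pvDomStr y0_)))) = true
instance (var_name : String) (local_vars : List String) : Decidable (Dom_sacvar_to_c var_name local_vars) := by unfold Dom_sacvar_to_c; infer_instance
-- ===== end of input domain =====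

-- B replaces A's collect-signatures / collect-matches / sort staging by one accumulator pass
-- that keeps a running lexicographic maximum (objective: simpler; return value only).

-- ===== PORT A =====
-- A's inner character loop: skip chars until `limit` underscores have passed, keep the rest
def sacSigA (limit : Nat) (var : List Char) : List Char :=
  (var.foldl (fun (st : List Char × Nat) ch =>
    if st.2 < limit then (if ch = '_' then (st.1, st.2 + 1) else st)
    else (st.1 ++ [ch], st.2)) ([], 0)).1

def sacvar_to_c (var_name : String) (local_vars : List String) : Option String :=
  let valid_vars : List (List Char × String) :=
    local_vars.foldl (fun acc var =>
      let limit : Nat := if PySem.Str.slice var none (some 5) = "SACp_" then 3 else 1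
      acc ++ [(sacSigA limit var.toList, var)]) []
  let sig_size : Int := PySem.Str.len var_name
  let matched : List String :=
    valid_vars.foldl (fun acc v =>
      if PySem.List.slice v.1 none (some sig_size) = var_name.toList then acc ++ [v.2] else acc) []
  if matched ≠ [] then
    if matched.length = 1 then PySem.List.pyGet? matched 0
    else PySem.List.pyGet? (PySem.List.sorted matched (fun x => x)) ((matched.length : Int) - 1)
  else none

-- ===== PORT B =====
def sacvar_to_c_alt (var_name : String) (local_vars : List String) : Option String :=
  local_vars.foldl (fun best var =>
    let limit : Nat := if PySem.Str.startswith var "SACp_" then 3 else 1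
    -- var.split("_", limit): separator "_" is nonempty, so splitMax? is always `some`
    let parts := (PySem.Str.splitMax? var "_" (limit : Int)).getD []
    let signature := if h : limit < parts.length then parts[limit] else ""
    if PySem.Str.startswith signature var_name then
      match best with
      | none => some var
      | some b => if b < var then some var else some b
    else best) none

-- ===== PRECONDITION & SPEC =====
def Spec_sacvar_to_c (var_name : String) (local_vars : List String) (out : Option String) : Prop := out = sacvar_to_c_alt var_name local_vars
instance (var_name : String) (local_vars : List String) (out : Option String) : Decidable (Spec_sacvar_to_c var_name local_vars out) := by unfold Spec_sacvar_to_c; infer_instance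

-- ===== CLAIM (what is proved, stated in full; the proofs are below) =====
def Claim_equal_sacvar_to_c : Prop := ∀ (var_name : String) (local_vars : List String), Dom_sacvar_to_c var_name local_vars → Spec_sacvar_to_c var_name local_vars (sacvar_to_c var_name local_vars)

-- ===== LEMMAS AND PROOFS =====

-- the characters after the first `n` underscores ('' when there are fewer than `n`)
def sacRest : Nat → List Char → List Char
  | 0, l => l
  | _ + 1, [] => []
  | n + 1, c :: r => if c = '_' then sacRest n r else sacRest (n + 1) r

-- the shared per-variable match predicate
def sacP (var_name var : String) : Bool :=
  var_name.toList.isPrefixOf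
    (sacRest (if PySem.Str.startswith var "SACp_" then 3 else 1) var.toList)

theorem sacRest_nil (n : Nat) : sacRest n [] = [] := by
  cases n <;> rfl

-- A's char loop computes sacRest
theorem sacSigA_eq (limit : Nat) (l : List Char) : sacSigA limit l = sacRest limit l := by
  have key : ∀ (l : List Char) (sig : List Char) (u limit : Nat),
      (l.foldl (fun (st : List Char × Nat) ch =>
        if st.2 < limit then (if ch = '_' then (st.1, st.2 + 1) else st)
        else (st.1 ++ [ch], st.2)) (sig, u)).1 = sig ++ sacRest (limit - u) l := by
    intro l
    induction l with
    | nil => intro sig u limit; simp [sacRest_nil]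
    | cons c r ih =>
      intro sig u limit
      by_cases hu : u < limit
      · have hpos : limit - u = (limit - (u + 1)) + 1 := by omega
        by_cases hc : c = '_'
        · simp [List.foldl_cons, hu, hc, ih, hpos, sacRest]
        · simp [List.foldl_cons, hu, hc, ih, hpos, sacRest]
      · have h0 : limit - u = 0 := by omega
        simp only [List.foldl_cons, if_neg hu, ih, h0]
        simp [sacRest]
  simpa [sacSigA, Nat.sub_zero] using key l [] 0 limit

-- `var[:5] == "SACp_"` is `var.startswith("SACp_")`
theorem sacLimit_eq (var : String) :
    (PySem.Str.slice var none (some 5) = "SACp_") ↔ PySem.Str.startswith var "SACp_" = true := by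
  rw [PySem.Str.startswith_eq, PySem.Chars.startswith_iff, List.prefix_iff_eq_take]
  constructor
  · intro h
    have := congrArg String.toList h
    simpa [PySem.Str.toList_slice, PySem.List.slice_to _ (by norm_num : (0:Int) ≤ 5)] using this.symm
  · intro h
    apply String.ext
    simpa [PySem.Str.toList_slice, PySem.List.slice_to _ (by norm_num : (0:Int) ≤ 5)] using h.symm

-- `sig[:len(p)] == p` is `p.isPrefixOf sig`
theorem sacMatch_eq (p : String) (sig : List Char) :
    (PySem.List.slice sig none (some (PySem.Str.len p)) = p.toList) ↔
      p.toList.isPrefixOf sig = true := by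
  rw [List.isPrefixOf_iff_prefix, List.prefix_iff_eq_take]
  have hlen : PySem.Str.len p = (p.toList.length : Int) := by simp [PySem.Str.len_eq]
  rw [hlen, PySem.List.slice_to _ (by omega : (0:Int) ≤ (p.toList.length : Int))]
  simp [eq_comm]

-- A's matched list is the filter of local_vars by sacP
theorem matched_eq_filter (var_name : String) (local_vars : List String) :
    ((local_vars.foldl (fun acc var =>
        let limit : Nat := if PySem.Str.slice var none (some 5) = "SACp_" then 3 else 1
        acc ++ [(sacSigA limit var.toList, var)]) []).foldl (fun acc v =>
        if PySem.List.slice v.1 none (some (PySem.Str.len var_name)) = var_name.toList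
        then acc ++ [v.2] else acc) []) = local_vars.filter (sacP var_name) := by
  have h1 : (local_vars.foldl (fun acc var =>
      let limit : Nat := if PySem.Str.slice var none (some 5) = "SACp_" then 3 else 1
      acc ++ [(sacSigA limit var.toList, var)]) []) =
      local_vars.map (fun var =>
        (sacSigA (if PySem.Str.slice var none (some 5) = "SACp_" then 3 else 1) var.toList, var)) := by
    simpa using PySem.List.foldl_append_singleton_eq_map
      (fun var => (sacSigA (if PySem.Str.slice var none (some 5) = "SACp_" then 3 else 1) var.toList, var))
      local_vars []
  rw [h1]
  have hcond : ∀ var : String,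
      (decide (PySem.List.slice
        (sacSigA (if PySem.Str.slice var none (some 5) = "SACp_" then 3 else 1) var.toList)
        none (some (PySem.Str.len var_name)) = var_name.toList)) = sacP var_name var := by
    intro var
    rw [sacSigA_eq]
    have hlim : (if PySem.Str.slice var none (some 5) = "SACp_" then 3 else 1)
        = (if PySem.Str.startswith var "SACp_" then 3 else 1 : Nat) := by
      by_cases hs : PySem.Str.startswith var "SACp_" = true
      · rw [if_pos ((sacLimit_eq var).mpr hs), if_pos hs]
      · rw [if_neg (fun hc => hs ((sacLimit_eq var).mp hc)), if_neg hs]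
    rw [hlim, sacP]
    set limit : Nat := if PySem.Str.startswith var "SACp_" then 3 else 1
    by_cases hp : PySem.List.slice (sacRest limit var.toList) none (some (PySem.Str.len var_name)) = var_name.toList
    · rw [(sacMatch_eq var_name (sacRest limit var.toList)).mp hp]
      exact decide_eq_true hp
    · have : var_name.toList.isPrefixOf (sacRest limit var.toList) = false := by
        cases hb : var_name.toList.isPrefixOf (sacRest limit var.toList)
        · rfl
        · exact absurd ((sacMatch_eq var_name (sacRest limit var.toList)).mpr hb) hp
      rw [this]
      exact decide_eq_false hp
  have h2 := PySem.List.foldl_append_if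
    (fun (v : List Char × String) =>
      decide (PySem.List.slice v.1 none (some (PySem.Str.len var_name)) = var_name.toList))
    (fun v => v.2)
    (local_vars.map (fun var =>
      (sacSigA (if PySem.Str.slice var none (some 5) = "SACp_" then 3 else 1) var.toList, var))) []
  simp only [decide_eq_true_eq] at h2
  rw [h2, List.filter_map, List.map_map]
  simp only [List.nil_append]
  have hfilter : (List.filter ((fun (v : List Char × String) =>
      decide (PySem.List.slice v.1 none (some (PySem.Str.len var_name)) = var_name.toList)) ∘ fun var =>
      (sacSigA (if PySem.Str.slice var none (some 5) = "SACp_" then 3 else 1) var.toList, var)) local_vars)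
      = List.filter (sacP var_name) local_vars := by
    apply List.filter_congr
    intro var _
    simpa using hcond var
  rw [hfilter]
  have hid : ((fun (v : List Char × String) => v.2) ∘ fun var =>
      (sacSigA (if PySem.Str.slice var none (some 5) = "SACp_" then 3 else 1) var.toList, var)) = id := rfl
  rw [hid, List.map_id]

-- pure description of splitOnMax.go with the single-character separator "_"
def sacSpl : Nat → List Char → List Char → List (List Char)
  | _, [], cur => [cur.reverse]
  | m, c :: r, cur =>
    if m = 0 then [cur.reverse ++ (c :: r)]
    else if c = '_' then cur.reverse :: sacSpl (m - 1) r []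
    else sacSpl m r (c :: cur)

theorem go_eq_spl : ∀ (l : List Char) (fuel m : Nat) (cur : List Char) (acc : List (List Char)),
    l.length < fuel →
    PySem.Chars.splitOnMax.go ['_'] fuel m l cur acc = acc.reverse ++ sacSpl m l cur := by
  intro l
  induction l with
  | nil =>
    intro fuel m cur acc hf
    match fuel with
    | f + 1 => simp [PySem.Chars.splitOnMax.go, sacSpl]
  | cons c r ih =>
    intro fuel m cur acc hf
    match fuel, hf with
    | f + 1, hf =>
      by_cases hm : m = 0
      · simp [PySem.Chars.splitOnMax.go, hm, sacSpl]
      · by_cases hc : c = '_'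
        · have hpre : List.isPrefixOf ['_'] (c :: r) = true := by
            simp [List.isPrefixOf, hc]
          simp only [PySem.Chars.splitOnMax.go, if_neg hm, hpre, if_true]
          simp only [show List.drop (['_'].length) (c :: r) = r from rfl]
          rw [ih f (m - 1) [] (cur.reverse :: acc) (by simpa using Nat.lt_of_succ_lt_succ hf)]
          simp [sacSpl, hm, hc]
        · have hpre : List.isPrefixOf ['_'] (c :: r) = false := by
            simp only [List.isPrefixOf, Bool.and_true]
            exact beq_eq_false_iff_ne.mpr (fun h => hc h.symm)
          simp only [PySem.Chars.splitOnMax.go, if_neg hm, hpre, Bool.false_eq_true, if_false]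
          rw [ih f m (c :: cur) acc (by simpa using Nat.lt_of_succ_lt_succ hf)]
          simp [sacSpl, hm, hc]

-- element `m` of the split (or "" when absent) is sacRest m
theorem spl_get : ∀ (l : List Char) (m : Nat) (cur : List Char), (m = 0 → cur = []) →
    (sacSpl m l cur)[m]? = some (sacRest m l) ∨
      ((sacSpl m l cur)[m]? = none ∧ sacRest m l = []) := by
  intro l
  induction l with
  | nil =>
    intro m cur h0
    match m with
    | 0 => left; simp [sacSpl, sacRest, h0 rfl]
    | m + 1 => right; simp [sacSpl, sacRest]
  | cons c r ih =>
    intro m cur h0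
    match m with
    | 0 => left; simp [sacSpl, sacRest, h0 rfl]
    | m + 1 =>
      by_cases hc : c = '_'
      · simp only [sacSpl, Nat.succ_ne_zero, if_false, if_pos hc, Nat.add_sub_cancel]
        have := ih m [] (fun _ => rfl)
        rcases this with h | ⟨h1, h2⟩
        · left; simpa [sacRest, hc] using h
        · right; simpa [sacRest, hc, h1] using h2
      · simp only [sacSpl, Nat.succ_ne_zero, if_false, if_neg hc]
        have := ih (m + 1) (c :: cur) (fun h => absurd h (Nat.succ_ne_zero m))
        rcases this with h | ⟨h1, h2⟩
        · left; simpa [sacRest, hc] using h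
        · right; simpa [sacRest, hc, h1] using h2

-- B's per-variable signature test equals sacP
theorem alt_cond_eq (var_name var : String) :
    (PySem.Str.startswith
      (let limit : Nat := if PySem.Str.startswith var "SACp_" then 3 else 1
       let parts := (PySem.Str.splitMax? var "_" (limit : Int)).getD []
       if h : limit < parts.length then parts[limit] else "") var_name) = sacP var_name var := by
  set limit : Nat := if PySem.Str.startswith var "SACp_" then 3 else 1 with hlimit
  have hsplit : PySem.Str.splitMax? var "_" (limit : Int) =
      some ((PySem.Chars.splitOnMax var.toList ['_'] (limit : Int)).map String.ofList) := by
    rfl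
  have hgo : PySem.Chars.splitOnMax var.toList ['_'] (limit : Int) = sacSpl limit var.toList [] := by
    rw [PySem.Chars.splitOnMax, if_neg (by omega : ¬ ((limit : Int) < 0))]
    rw [go_eq_spl var.toList (var.toList.length + 1) (limit : Int).toNat [] [] (Nat.lt_succ_self _)]
    simp
  have hlim0 : limit ≠ 0 := by
    rw [hlimit]; split <;> simp
  rcases spl_get var.toList limit [] (fun h => absurd h hlim0) with h | ⟨h1, h2⟩
  · have hlen : limit < (sacSpl limit var.toList []).length := by
      by_contra hle
      rw [List.getElem?_eq_none (by omega)] at h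
      simp at h
    have hget : (sacSpl limit var.toList [])[limit] = sacRest limit var.toList := by
      have h' := h; rw [List.getElem?_eq_getElem hlen] at h'
      exact Option.some.inj h'
    simp only [hsplit, hgo, Option.getD_some, List.length_map]
    rw [dif_pos hlen, List.getElem_map, hget]
    rw [sacP, ← hlimit]
    rw [PySem.Str.startswith_eq]
    have hof : (String.ofList (sacRest limit var.toList)).toList = sacRest limit var.toList := by
      simp
    rw [hof, PySem.Chars.startswith]
  · have hlen : ¬ limit < (sacSpl limit var.toList []).length := by
      intro hlt
      rw [List.getElem?_eq_getElem hlt] at h1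
      simp at h1
    simp only [hsplit, hgo, Option.getD_some, List.length_map]
    rw [dif_neg hlen]
    rw [sacP, ← hlimit, h2]
    rfl

-- B's guarded fold over the whole list is the unguarded fold over the filtered list
theorem foldl_filter_step {α : Type} (p : α → Bool) (step : Option α → α → Option α) :
    ∀ (l : List α) (init : Option α),
      l.foldl (fun best x => if p x then step best x else best) init =
        (l.filter p).foldl step init := by
  intro l
  induction l with
  | nil => intro init; rfl
  | cons x r ih =>
    intro init
    by_cases hx : p x = true
    · simp [hx, ih]
    · simp [hx, ih]

-- the running-max fold returns an element that bounds the list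
theorem maxfold_spec : ∀ (l : List String) (b : String),
    ∃ m, l.foldl (fun best v => match best with
      | none => some v
      | some b => if b < v then some v else some b) (some b) = some m ∧
      (m = b ∨ m ∈ l) ∧ b ≤ m ∧ ∀ y ∈ l, y ≤ m := by
  intro l
  induction l with
  | nil => intro b; exact ⟨b, rfl, Or.inl rfl, le_refl _, by simp⟩
  | cons x r ih =>
    intro b
    have hred : (x :: r).foldl (fun (best : Option String) v => match best with
        | none => some v
        | some b => if b < v then some v else some b) (some b)
        = r.foldl (fun best v => match best with
        | none => some v
        | some b => if b < v then some v else some b) (if b < x then some x else some b) := rfl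
    by_cases hx : b < x
    · obtain ⟨m, hm, hmem, hle, hall⟩ := ih x
      refine ⟨m, by rw [hred, if_pos hx]; exact hm, ?_, le_of_lt (lt_of_lt_of_le hx hle), ?_⟩
      · rcases hmem with h | h
        · exact Or.inr (by simp [h])
        · exact Or.inr (by simp [h])
      · intro y hy
        rcases List.mem_cons.mp hy with h | h
        · exact h ▸ hle
        · exact hall y h
    · obtain ⟨m, hm, hmem, hle, hall⟩ := ih b
      refine ⟨m, by rw [hred, if_neg hx]; exact hm, ?_, hle, ?_⟩
      · rcases hmem with h | h
        · exact Or.inl h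
        · exact Or.inr (by simp [h])
      · intro y hy
        rcases List.mem_cons.mp hy with h | h
        · exact h ▸ le_trans (le_of_not_gt hx) hle
        · exact hall y h

-- A's result on the matched list ms equals B's running-max fold on ms
theorem result_eq (ms : List String) :
    (if ms ≠ [] then
      if ms.length = 1 then PySem.List.pyGet? ms 0
      else PySem.List.pyGet? (PySem.List.sorted ms (fun x => x)) ((ms.length : Int) - 1)
    else none) =
      ms.foldl (fun best v => match best with
        | none => some v
        | some b => if b < v then some v else some b) none := by
  match ms with
  | [] => rfl
  | x :: r =>
    have hfold : (x :: r).foldl (fun best (v : String) => match best with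
        | none => some v
        | some b => if b < v then some v else some b) none =
        r.foldl (fun best v => match best with
        | none => some v
        | some b => if b < v then some v else some b) (some x) := by
      simp [List.foldl_cons]
    obtain ⟨m, hm, hmem, hle, hall⟩ := maxfold_spec r x
    have hmemx : m ∈ x :: r := by
      rcases hmem with h | h
      · simp [h]
      · simp [h]
    have hallx : ∀ y ∈ x :: r, y ≤ m := by
      intro y hy
      rcases List.mem_cons.mp hy with h | h
      · exact h ▸ hle
      · exact hall y h
    rw [if_pos (by simp : (x :: r) ≠ []), hfold, hm]
    by_cases h1 : (x :: r).length = 1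
    · have hr : r = [] := by
        cases r with
        | nil => rfl
        | cons a b => simp at h1
      subst hr
      simp only [if_pos h1]
      have : m = x := le_antisymm (by rcases hmem with h | h; exact h.le; simp at h) hle
      simp [PySem.List.pyGet?, PySem.List.pyIdx?, this]
    · rw [if_neg h1]
      have hlen : 0 < (x :: r).length := by simp
      have hset : ((((x :: r).length : Int)) - 1) = (((x :: r).length - 1 : Nat) : Int) := by
        have : 1 ≤ (x :: r).length := hlen
        push_cast [this]
        omega
      rw [hset, PySem.List.pyGet?_natCast]
      have hslen : ((x :: r).length - 1) < (PySem.List.sorted (x :: r) (fun x => x)).length := by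
        rw [PySem.List.length_sorted]; omega
      rw [List.getElem?_eq_getElem hslen]
      congr 1
      have hmem' : (PySem.List.sorted (x :: r) (fun x => x))[(x :: r).length - 1] ∈ x :: r := by
        rw [← PySem.List.mem_sorted (x :: r) (fun x => x) false]
        exact List.getElem_mem hslen
      apply le_antisymm (hallx _ hmem')
      obtain ⟨p, hp, hpm⟩ := List.getElem_of_mem
        ((PySem.List.mem_sorted (x :: r) (fun x => x) false m).mpr hmemx)
      rw [← hpm]
      exact PySem.List.sorted_id_getElem_mono (x :: r)
        (by rw [PySem.List.length_sorted] at hp; omega) hslen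

-- ===== VERDICT (by name: the statement is the Claim_ definition above) =====
theorem sacvar_to_c_spec : Claim_equal_sacvar_to_c := by
  intro var_name local_vars _
  unfold Spec_sacvar_to_c sacvar_to_c sacvar_to_c_alt
  simp only []
  rw [matched_eq_filter var_name local_vars]
  have hcond : (fun (best : Option String) (var : String) =>
      let limit : Nat := if PySem.Str.startswith var "SACp_" then 3 else 1
      let parts := (PySem.Str.splitMax? var "_" (limit : Int)).getD []
      let signature := if h : limit < parts.length then parts[limit] else ""
      if PySem.Str.startswith signature var_name then
        match best with
        | none => some var
        | some b => if b < var then some var else some b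
      else best) = (fun best var =>
      if sacP var_name var then
        match best with
        | none => some var
        | some b => if b < var then some var else some b
      else best) := by
    funext best var
    simp only []
    rw [alt_cond_eq var_name var]
  rw [hcond, foldl_filter_step (sacP var_name)
    (fun best v => match best with
      | none => some v
      | some b => if b < v then some v else some b) local_vars none]
  exact result_eq (local_vars.filter (sacP var_name))
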